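-- pv_equiv track=rewrite | github.com/aidagroup/regelum | src/regelum/core.py | _simple_cycles
-- ===== SOURCE A (Python) =====
-- def _simple_cycles(
--     nodes: list[str],
--     edges: list[tuple[str, str]],
-- ) -> tuple[tuple[str, ...], ...]:
--     adjacency: dict[str, list[str]] = {node: [] for node in nodes}
--     for source, target in edges:
--         adjacency.setdefault(source, []).append(target)
--
--     cycles: set[tuple[str, ...]] = set()
--     for start in nodes:
--         stack: list[tuple[str, list[str]]] = [(start, [start])]
--         while stack:
--             current, path = stack.pop()
--             for target in adjacency.get(current, []):
--                 if target == start: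
--                     cycles.add(_canonical_cycle(tuple(path)))
--                 elif target not in path:
--                     stack.append((target, [*path, target]))
--     return tuple(sorted(cycles))
--
-- def _canonical_cycle(cycle: tuple[str, ...]) -> tuple[str, ...]:
--     rotations = [cycle[index:] + cycle[:index] for index in range(len(cycle))]
--     return min(rotations)
-- ===== SOURCE B (Python) =====
-- def _simple_cycles(
--     nodes: list[str],
--     edges: list[tuple[str, str]],
-- ) -> tuple[tuple[str, ...], ...]:
--     adjacency: dict[str, list[str]] = {}
--     for source, target in edges:
--         adjacency.setdefault(source, []).append(target)
--
--     found: set[tuple[str, ...]] = set()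
--
--     def extend(start: str, path: list[str]) -> None:
--         for target in adjacency.get(path[-1], ()):
--             if target == start:
--                 k = path.index(min(path))
--                 found.add(tuple(path[k:] + path[:k]))
--             elif target not in path:
--                 extend(start, path + [target])
--
--     for start in nodes:
--         extend(start, [start])
--     return tuple(sorted(found))
-- ===== Notes on version B (the rewrite author's own statement) =====
-- stated objective: simpler
-- what changed: Replaces the explicit LIFO stack of (node, path) states and the pre-seeded adjacency dict with a plain recursive depth-first extension over an adjacency dict built from the edges alone, and canonicalises each found cycle in one O(n) pass (rotating at its unique minimal node) instead of materialising all n rotations and taking their minimum.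
import Mathlib
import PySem

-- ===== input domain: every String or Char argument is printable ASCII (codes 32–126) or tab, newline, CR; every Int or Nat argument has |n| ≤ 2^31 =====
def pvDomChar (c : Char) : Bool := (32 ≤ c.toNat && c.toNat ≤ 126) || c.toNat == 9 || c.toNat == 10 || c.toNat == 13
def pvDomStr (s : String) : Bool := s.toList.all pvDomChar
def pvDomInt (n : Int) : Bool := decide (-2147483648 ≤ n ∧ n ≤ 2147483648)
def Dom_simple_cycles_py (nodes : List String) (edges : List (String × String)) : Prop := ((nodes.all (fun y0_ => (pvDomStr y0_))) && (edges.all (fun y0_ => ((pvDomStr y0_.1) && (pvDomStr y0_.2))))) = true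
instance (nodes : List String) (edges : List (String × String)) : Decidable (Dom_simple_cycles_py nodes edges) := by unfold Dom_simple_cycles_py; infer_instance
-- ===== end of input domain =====

-- B replaces A's explicit LIFO stack of (node, path) states and pre-seeded adjacency dict with a
-- plain recursive depth-first extension over an adjacency dict built from the edges alone, and
-- canonicalises each cycle in one pass (rotation at its unique minimal node) instead of
-- materialising and minimising all rotations; same exact result, proved below.

-- ===== PORT A =====

-- _canonical_cycle: all rotations, then min(rotations)
def pvCanonA (cycle : List String) : List String :=
  let rotations := (PySem.List.pyRange 0 (PySem.List.len cycle) 1).map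
    (fun i => PySem.List.slice cycle (some i) none ++ PySem.List.slice cycle none (some i))
  (PySem.List.min? rotations (fun x => x)).getD []

-- adjacency = {node: [] for node in nodes}; then setdefault(source, []).append(target)
def pvAdjA (nodes : List String) (edges : List (String × String)) :
    PySem.Dict String (List String) :=
  let d0 := nodes.foldl (fun d node => d.insert node ([] : List String)) PySem.Dict.empty
  edges.foldl (fun d e => d.modify e.1 [] (fun l => l ++ [e.2])) d0

-- the inner `for target in adjacency.get(current, [])` loop of A: pushes onto the stack,
-- adds found cycles to the set
def pvStepA (start : String) (path : List String) (targets : List String)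
    (rest : List (String × List String)) (cyc : PySem.Set (List String)) :
    List (String × List String) × PySem.Set (List String) :=
  targets.foldl
    (fun (sp : List (String × List String) × PySem.Set (List String)) target =>
      if target = start then (sp.1, PySem.Set.add sp.2 (pvCanonA path))
      else if target ∈ path then sp
      else ((target, path ++ [target]) :: sp.1, sp.2)) (rest, cyc)

-- the while-stack loop of A (stack head = Python's stack top); the fuel argument is a
-- totality guard only: on every reachable state the measure below strictly decreases and
-- stays under the initial fuel, so fuel never reaches 0 (proved in the lemmas section)
def pvLoopA (adj : PySem.Dict String (List String)) (start : String) :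
    Nat → List (String × List String) → PySem.Set (List String) → PySem.Set (List String)
  | 0, _, cyc => cyc
  | _ + 1, [], cyc => cyc
  | f + 1, (current, path) :: rest, cyc =>
    let step := pvStepA start path (adj.getD current []) rest cyc
    pvLoopA adj start f step.1 step.2

def simple_cycles_py (nodes : List String) (edges : List (String × String)) :
    List (List String) :=
  let adjacency := pvAdjA nodes edges
  let K := edges.length
  let N := edges.length + 1
  let cycles := nodes.foldl
    (fun cyc start => pvLoopA adjacency start ((K + 2) ^ N) [(start, [start])] cyc)
    (PySem.Set.empty : PySem.Set (List String))
  PySem.List.sorted cycles (fun x => x)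

-- ===== PORT B =====

-- B's one-pass canonicalisation: rotate at the index of the minimal element
def pvCanonB (path : List String) : List String :=
  let m := (PySem.List.min? path (fun x => x)).getD ""
  let k := (PySem.List.index? path m).getD 0
  PySem.List.slice path (some (k : Int)) none ++ PySem.List.slice path none (some (k : Int))

-- adjacency built from the edges alone
def pvAdjB (edges : List (String × String)) : PySem.Dict String (List String) :=
  edges.foldl (fun d e => d.modify e.1 [] (fun l => l ++ [e.2])) PySem.Dict.empty

-- B's recursive `extend(start, path)`; the fuel argument is a totality guard only: it is
-- edges.length + 2 - path.length on every reachable call and a simple path over the edge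
-- targets plus start never exceeds edges.length + 1 nodes, so fuel never reaches 0
def pvExtB (adj : PySem.Dict String (List String)) (start : String) :
    Nat → List String → PySem.Set (List String) → PySem.Set (List String)
  | 0, _, found => found
  | f + 1, path, found =>
    (adj.getD (PySem.List.pyGetD path (-1) "") []).foldl
      (fun fnd target =>
        if target = start then PySem.Set.add fnd (pvCanonB path)
        else if target ∈ path then fnd
        else pvExtB adj start f (path ++ [target]) fnd) found

def simple_cycles_py_alt (nodes : List String) (edges : List (String × String)) :
    List (List String) :=
  let adjacency := pvAdjB edges
  let found := nodes.foldl
    (fun fnd start => pvExtB adjacency start (edges.length + 1) [start] fnd)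
    (PySem.Set.empty : PySem.Set (List String))
  PySem.List.sorted found (fun x => x)

-- ===== PRECONDITION & SPEC =====
def Spec_simple_cycles_py (nodes : List String) (edges : List (String × String)) (out : List (List String)) : Prop := out = simple_cycles_py_alt nodes edges
instance (nodes : List String) (edges : List (String × String)) (out : List (List String)) : Decidable (Spec_simple_cycles_py nodes edges out) := by unfold Spec_simple_cycles_py; infer_instance

-- ===== CLAIM (what is proved, stated in full; the proofs are below) =====
def Claim_equal_simple_cycles_py : Prop := ∀ (nodes : List String) (edges : List (String × String)), Dom_simple_cycles_py nodes edges → Spec_simple_cycles_py nodes edges (simple_cycles_py nodes edges)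

-- ===== LEMMAS AND PROOFS =====

-- stack/frontier measure: A's loop strictly decreases it, so the initial fuel suffices
def pvMeasA (K N : Nat) (stack : List (String × List String)) : Nat :=
  (stack.map (fun st => (K + 2) ^ (N + 1 - st.2.length))).sum

theorem pvFoldA_spec (start : String) (path : List String)
    (rest : List (String × List String)) (cyc : PySem.Set (List String))
    (targets : List String) :
    pvStepA start path targets rest cyc
    = (((targets.filter (fun t => decide (t ≠ start ∧ t ∉ path))).map
          (fun t => (t, path ++ [t]))).reverse ++ rest,
       if start ∈ targets then PySem.Set.add cyc (pvCanonA path) else cyc) := by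
  unfold pvStepA
  induction targets generalizing rest cyc with
  | nil => simp
  | cons t ts ih =>
    by_cases h1 : t = start
    · subst h1
      simp only [List.foldl_cons, List.filter_cons]
      rw [ih]
      simp
    · by_cases h2 : t ∈ path
      · simp only [List.foldl_cons, if_neg h1, if_pos h2, List.filter_cons]
        rw [ih]
        simp [h1, h2, Ne.symm h1]
      · simp only [List.foldl_cons, if_neg h1, if_neg h2, List.filter_cons]
        rw [ih]
        simp [h1, h2, Ne.symm h1]

theorem pvMeasStep (K N len cnt : Nat) (hlen : len ≤ N) (hcnt : cnt ≤ K) :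
    cnt * (K + 2) ^ (N + 1 - (len + 1)) < (K + 2) ^ (N + 1 - len) := by
  have h1 : N + 1 - len = (N + 1 - (len + 1)) + 1 := by omega
  rw [h1, pow_succ]
  have hpos : 0 < (K + 2) ^ (N + 1 - (len + 1)) := Nat.pow_pos (by omega)
  nlinarith

-- the new stack's measure after processing (current, path)
theorem pvMeasA_step (K N : Nat) (start current : String) (path : List String)
    (rest : List (String × List String)) (targets : List String)
    (hlen : path.length ≤ N) (hcnt : targets.length ≤ K) :
    pvMeasA K N (((targets.filter (fun t => decide (t ≠ start ∧ t ∉ path))).map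
        (fun t => (t, path ++ [t]))).reverse ++ rest)
      < pvMeasA K N ((current, path) :: rest) := by
  simp only [pvMeasA, List.map_append, List.sum_append, List.map_reverse,
    List.sum_reverse, List.map_map, List.map_cons, List.sum_cons]
  have hcnt' : ((targets.filter (fun t => decide (t ≠ start ∧ t ∉ path))).length) ≤ K :=
    le_trans (List.length_filter_le _ _) hcnt
  have hsum : ((targets.filter (fun t => decide (t ≠ start ∧ t ∉ path))).map
        ((fun st => (K + 2) ^ (N + 1 - st.2.length)) ∘ fun t => (t, path ++ [t]))).sum
      = (targets.filter (fun t => decide (t ≠ start ∧ t ∉ path))).length *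
          (K + 2) ^ (N + 1 - (path.length + 1)) := by
    simp only [Function.comp_def, List.length_append, List.length_cons, List.length_nil]
    rw [List.map_const']
    simp [List.sum_replicate]
  rw [hsum]
  have := pvMeasStep K N path.length
    (targets.filter (fun t => decide (t ≠ start ∧ t ∉ path))).length hlen hcnt'
  omega

-- the common reference object: cycles found by exhaustive simple-path extension from `path`
def pvTree (adj : PySem.Dict String (List String)) (start : String) :
    Nat → List String → List (List String)
  | 0, _ => []
  | f + 1, path =>
    (adj.getD (PySem.List.pyGetD path (-1) "") []).flatMap
      (fun t => if t = start then [pvCanonA path]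
        else if t ∈ path then []
        else pvTree adj start f (path ++ [t]))

-- same tree with B's canonicalisation
def pvTreeB (adj : PySem.Dict String (List String)) (start : String) :
    Nat → List String → List (List String)
  | 0, _ => []
  | f + 1, path =>
    (adj.getD (PySem.List.pyGetD path (-1) "") []).flatMap
      (fun t => if t = start then [pvCanonB path]
        else if t ∈ path then []
        else pvTreeB adj start f (path ++ [t]))

theorem pvAdjB_getD (edges : List (String × String)) (s : String) :
    (pvAdjB edges).getD s [] = (edges.filter (fun e => e.1 == s)).map (fun e => e.2) := by
  unfold pvAdjB
  rw [PySem.Dict.getD_foldl_modify_append]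
  simp

theorem pvAdjA_init_getD (nodes : List String) (d : PySem.Dict String (List String))
    (hd : ∀ c, d.getD c [] = []) (c : String) :
    (nodes.foldl (fun d node => d.insert node ([] : List String)) d).getD c [] = [] := by
  induction nodes generalizing d with
  | nil => exact hd c
  | cons n ns ih =>
    simp only [List.foldl_cons]
    exact ih _ (fun c' => by rw [PySem.Dict.getD_insert]; split <;> simp [hd])

theorem pvAdjA_getD (nodes : List String) (edges : List (String × String)) (s : String) :
    (pvAdjA nodes edges).getD s [] = (edges.filter (fun e => e.1 == s)).map (fun e => e.2) := by
  unfold pvAdjA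
  rw [PySem.Dict.getD_foldl_modify_append]
  rw [pvAdjA_init_getD nodes PySem.Dict.empty (fun c => PySem.Dict.getD_empty c [])]
  simp

theorem pvTree_congr (adj1 adj2 : PySem.Dict String (List String)) (start : String)
    (h : ∀ s, adj1.getD s [] = adj2.getD s []) :
    ∀ (f : Nat) (path : List String), pvTree adj1 start f path = pvTree adj2 start f path := by
  intro f
  induction f with
  | zero => intro path; rfl
  | succ f ih =>
    intro path
    simp only [pvTree]
    rw [h]
    exact congrArg (fun fn => List.flatMap fn (adj2.getD (PySem.List.pyGetD path (-1) "") []))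
      (funext fun t => by split_ifs <;> first | rfl | exact ih _)

-- PySem.List.min?_isMin, transported to the DecidableLT instance pvCanonA's min? elaborated with
theorem pvMin?_isMin_listStr {xs : List (List String)} {m : List String}
    (h : PySem.List.min? xs (fun x => x) = some m) : ∀ y ∈ xs, m ≤ y := by
  have h2 : @PySem.List.min? (List String) (List String) inferInstance
      LinearOrder.toDecidableLT xs (fun x => x) = some m := by
    rw [← h]
    congr 1
  exact PySem.List.min?_isMin h2

-- on a nonempty duplicate-free path, rotating at the minimal element IS the minimal rotation
theorem pvCanon_eq (p : List String) (hne : p ≠ []) (hnd : p.Nodup) :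
    pvCanonB p = pvCanonA p := by
  obtain ⟨m, hm⟩ : ∃ m, PySem.List.min? p (fun x => x) = some m := by
    cases h : PySem.List.min? p (fun x => x) with
    | none => exact absurd ((PySem.List.min?_eq_none_iff p _).mp h) hne
    | some m => exact ⟨m, rfl⟩
  have hmem : m ∈ p := PySem.List.min?_mem hm
  have hmin : ∀ y ∈ p, m ≤ y := PySem.List.min?_isMin hm
  obtain ⟨k, hk⟩ : ∃ k, PySem.List.index? p m = some k := by
    cases h : PySem.List.index? p m with
    | none => exact absurd ((PySem.List.index?_eq_none_iff p m).mp h) (by simp [hmem])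
    | some k => exact ⟨k, rfl⟩
  obtain ⟨pre, suf, hsplit, hklen, hmpre⟩ := (PySem.List.index?_eq_some_iff p m k).mp hk
  have hkl : k < p.length := by rw [hsplit, ← hklen]; simp
  have hgetk' : p[k]? = some m := by
    rw [hsplit, ← hklen]
    simp
  have hgetk : p[k]'hkl = m := by
    have := hgetk'
    rw [List.getElem?_eq_getElem hkl] at this
    exact Option.some_injective _ this
  have hcanB : pvCanonB p = p.drop k ++ p.take k := by
    simp only [pvCanonB, hm, hk, Option.getD_some,
      PySem.List.slice_from_natCast, PySem.List.slice_to_natCast]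
  have hrot : (PySem.List.pyRange 0 (PySem.List.len p) 1).map
      (fun i => PySem.List.slice p (some i) none ++ PySem.List.slice p none (some i))
      = (List.range p.length).map (fun j => p.drop j ++ p.take j) := by
    rw [PySem.List.pyRange_one]
    simp only [List.map_map, Function.comp_def, zero_add, Int.sub_zero]
    have hlen : (PySem.List.len p).toNat = p.length := by simp [PySem.List.len]
    rw [hlen]
    exact List.map_congr_left (fun j _ => by
      rw [PySem.List.slice_from_natCast, PySem.List.slice_to_natCast])
  have hkey : ∀ j, j < p.length → p.drop k ++ p.take k ≤ p.drop j ++ p.take j := by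
    intro j hj
    by_cases hjk : j = k
    · subst hjk; exact le_refl _
    · have hdk : p.drop k = m :: p.drop (k + 1) := by
        rw [← List.getElem_cons_drop hkl, hgetk]
      have hdj : p.drop j = p[j]'hj :: p.drop (j + 1) := (List.getElem_cons_drop hj).symm
      have hlt : m < p[j]'hj := by
        rcases lt_or_eq_of_le (hmin _ (List.getElem_mem hj)) with h | h
        · exact h
        · exfalso
          apply hjk
          exact (List.Nodup.getElem_inj_iff hnd).mp (by rw [← h, hgetk])
      rw [hdk, hdj, List.cons_append, List.cons_append]
      exact le_of_lt (List.Lex.rel hlt)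
  have hplen : 0 < p.length := List.length_pos_iff.mpr hne
  have hrne : (List.range p.length).map (fun j => p.drop j ++ p.take j) ≠ [] := by
    simp only [ne_eq, List.map_eq_nil_iff, List.range_eq_nil]
    omega
  obtain ⟨r, hr⟩ : ∃ r, PySem.List.min? ((List.range p.length).map
      (fun j => p.drop j ++ p.take j)) (fun x => x) = some r := by
    cases h : PySem.List.min? ((List.range p.length).map
        (fun j => p.drop j ++ p.take j)) (fun x => x) with
    | none => exact absurd ((PySem.List.min?_eq_none_iff _ _).mp h) hrne
    | some r => exact ⟨r, rfl⟩
  have hA : pvCanonA p = r := by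
    simp only [pvCanonA, hrot, hr, Option.getD_some]
  obtain ⟨j, hjlt, hjr⟩ : ∃ j, j < p.length ∧ p.drop j ++ p.take j = r := by
    have := PySem.List.min?_mem hr
    obtain ⟨j, hj, hjr⟩ := List.mem_map.mp this
    exact ⟨j, List.mem_range.mp hj, hjr⟩
  have hmemrot : p.drop k ++ p.take k ∈ (List.range p.length).map
      (fun j => p.drop j ++ p.take j) :=
    List.mem_map.mpr ⟨k, List.mem_range.mpr hkl, rfl⟩
  have h1 : r ≤ p.drop k ++ p.take k := pvMin?_isMin_listStr hr _ hmemrot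
  have h2 : p.drop k ++ p.take k ≤ r := hjr ▸ hkey j hjlt
  rw [hcanB, hA]
  exact le_antisymm h2 h1

-- pvTreeB = pvTree on nonempty duplicate-free paths
theorem pvTreeB_eq (adj : PySem.Dict String (List String)) (start : String) :
    ∀ (f : Nat) (path : List String), path ≠ [] → path.Nodup →
    pvTreeB adj start f path = pvTree adj start f path := by
  intro f
  induction f with
  | zero => intro path _ _; rfl
  | succ f ih =>
    intro path hne hnd
    simp only [pvTreeB, pvTree]
    refine congrArg (fun fn => List.flatMap fn _) (funext fun t => ?_)
    split_ifs with h1 h2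
    · rw [pvCanon_eq path hne hnd]
    · rfl
    · exact ih (path ++ [t]) (by simp)
        (by
          apply List.Nodup.append hnd (List.nodup_singleton t)
          intro a ha hat
          rw [List.mem_singleton] at hat
          exact h2 (hat ▸ ha))

-- ----- A-side loop characterisation -----

theorem pvLoopA_nodup (adj : PySem.Dict String (List String)) (start : String) :
    ∀ (f : Nat) (stack : List (String × List String)) (cyc : PySem.Set (List String)),
    cyc.Nodup → (pvLoopA adj start f stack cyc).Nodup := by
  intro f
  induction f with
  | zero => intro stack cyc h; exact h
  | succ f ih =>
    intro stack cyc h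
    match stack with
    | [] => exact h
    | (current, path) :: rest =>
      simp only [pvLoopA]
      apply ih
      show (pvStepA start path (adj.getD current []) rest cyc).2.Nodup
      rw [pvFoldA_spec]
      split
      · exact PySem.Set.nodup_add _ _ h
      · exact h

theorem pvLoopA_mem (adj : PySem.Dict String (List String)) (start : String)
    (univ : List String) (K N : Nat)
    (HK : ∀ s, (adj.getD s []).length ≤ K)
    (Hsub : ∀ s t, t ∈ adj.getD s [] → t ∈ univ)
    (HN : univ.length ≤ N) :
    ∀ (f : Nat) (stack : List (String × List String)) (cyc : PySem.Set (List String)),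
    pvMeasA K N stack ≤ f →
    (∀ st ∈ stack, st.2.Nodup ∧ (∀ x ∈ st.2, x ∈ univ) ∧ st.2.getLast? = some st.1) →
    ∀ x, x ∈ pvLoopA adj start f stack cyc ↔
      x ∈ cyc ∨ ∃ st ∈ stack, x ∈ pvTree adj start (N + 1 - st.2.length) st.2 := by
  intro f
  induction f with
  | zero =>
    intro stack cyc hf hinv x
    match stack with
    | [] => simp [pvLoopA]
    | (current, path) :: rest =>
      exfalso
      have : 0 < (K + 2) ^ (N + 1 - path.length) := Nat.pow_pos (by omega)
      simp only [pvMeasA, List.map_cons, List.sum_cons] at hf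
      omega
  | succ f ih =>
    intro stack cyc hf hinv x
    match stack with
    | [] => simp [pvLoopA]
    | (current, path) :: rest =>
      obtain ⟨hnd, hsubp, hlast⟩ := hinv _ List.mem_cons_self
      dsimp only at hnd hsubp hlast
      have hnep : path ≠ [] := by
        intro hcon; rw [hcon] at hlast; simp at hlast
      have hplen : path.length ≤ N :=
        le_trans ((List.subperm_of_subset hnd (fun y hy => hsubp y hy)).length_le) HN
      have hgetlast : PySem.List.pyGetD path (-1) "" = current := by
        rw [PySem.List.pyGetD_neg_one path "" hnep]
        have := List.getLast?_eq_getLast hnep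
        rw [this] at hlast
        exact Option.some_injective _ hlast
      have hstep := pvFoldA_spec start path rest cyc (adj.getD current [])
      have hf' : pvMeasA K N (pvStepA start path (adj.getD current []) rest cyc).1 ≤ f := by
        rw [hstep]
        dsimp only
        have := pvMeasA_step K N start current path rest (adj.getD current [])
          hplen (HK current)
        omega
      have hinv' : ∀ st ∈ (pvStepA start path (adj.getD current []) rest cyc).1,
          st.2.Nodup ∧ (∀ x ∈ st.2, x ∈ univ) ∧ st.2.getLast? = some st.1 := by
        rw [hstep]
        intro st hst
        rcases List.mem_append.mp hst with hst | hst
        · rw [List.mem_reverse] at hst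
          obtain ⟨t, htf, rfl⟩ := List.mem_map.mp hst
          have htmem := (List.mem_filter.mp htf).1
          have htc := (List.mem_filter.mp htf).2
          simp only [decide_eq_true_eq] at htc
          refine ⟨?_, ?_, List.getLast?_concat⟩
          · apply List.Nodup.append hnd (List.nodup_singleton t)
            intro a ha hat
            rw [List.mem_singleton] at hat
            exact htc.2 (hat ▸ ha)
          intro y hy
          rcases List.mem_append.mp hy with hy | hy
          · exact hsubp y hy
          · rw [List.mem_singleton.mp hy]; exact Hsub current t htmem
        · exact hinv st (List.mem_cons_of_mem _ hst)
      have hmem : x ∈ pvLoopA adj start f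
          (pvStepA start path (adj.getD current []) rest cyc).1
          (pvStepA start path (adj.getD current []) rest cyc).2 ↔
          x ∈ (pvStepA start path (adj.getD current []) rest cyc).2 ∨
          ∃ st ∈ (pvStepA start path (adj.getD current []) rest cyc).1,
            x ∈ pvTree adj start (N + 1 - st.2.length) st.2 := ih _ _ hf' hinv' x
      show x ∈ pvLoopA adj start f _ _ ↔ _
      refine Iff.trans hmem ?_
      rw [hstep]
      have htree : x ∈ pvTree adj start (N + 1 - path.length) path ↔
          (start ∈ adj.getD current [] ∧ x = pvCanonA path) ∨
          ∃ t ∈ adj.getD current [], (t ≠ start ∧ t ∉ path) ∧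
            x ∈ pvTree adj start (N - path.length) (path ++ [t]) := by
        have hfuel : N + 1 - path.length = (N - path.length) + 1 := by omega
        rw [hfuel]
        simp only [pvTree, hgetlast, List.mem_flatMap]
        constructor
        · rintro ⟨t, ht, hx⟩
          split_ifs at hx with h1 h2
          · exact Or.inl ⟨h1 ▸ ht, by simpa using hx⟩
          · simp at hx
          · exact Or.inr ⟨t, ht, ⟨h1, h2⟩, hx⟩
        · rintro (⟨hs, rfl⟩ | ⟨t, ht, ⟨h1, h2⟩, hx⟩)
          · exact ⟨start, hs, by simp⟩
          · exact ⟨t, ht, by simp [h1, h2, hx]⟩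
      constructor
      · rintro (hx | hx)
        · split_ifs at hx with hs
          · rcases (PySem.Set.mem_add _ _ _).mp hx with hx | hx
            · exact Or.inl hx
            · refine Or.inr ⟨(current, path), List.mem_cons_self, ?_⟩
              rw [htree]; exact Or.inl ⟨hs, hx⟩
          · exact Or.inl hx
        · obtain ⟨st, hst, hx⟩ := hx
          rcases List.mem_append.mp hst with hstm | hstm
          · rw [List.mem_reverse] at hstm
            obtain ⟨t, htf, rfl⟩ := List.mem_map.mp hstm
            have htmem := (List.mem_filter.mp htf).1
            have htc := (List.mem_filter.mp htf).2
            simp only [decide_eq_true_eq] at htc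
            refine Or.inr ⟨(current, path), List.mem_cons_self, ?_⟩
            rw [htree]
            refine Or.inr ⟨t, htmem, htc, ?_⟩
            simpa [List.length_append, Nat.add_sub_add_right] using hx
          · exact Or.inr ⟨st, List.mem_cons_of_mem _ hstm, hx⟩
      · rintro (hx | hx)
        · refine Or.inl ?_
          split_ifs with hs
          · exact (PySem.Set.mem_add _ _ _).mpr (Or.inl hx)
          · exact hx
        · obtain ⟨st, hst, hx⟩ := hx
          rcases List.mem_cons.mp hst with rfl | hstm
          · rw [htree] at hx
            rcases hx with ⟨hs, rfl⟩ | ⟨t, ht, htc, hx⟩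
            · refine Or.inl ?_
              rw [if_pos hs]
              exact (PySem.Set.mem_add _ _ _).mpr (Or.inr rfl)
            · refine Or.inr ⟨(t, path ++ [t]), ?_, ?_⟩
              · refine List.mem_append.mpr (Or.inl ?_)
                rw [List.mem_reverse]
                exact List.mem_map.mpr ⟨t, List.mem_filter.mpr ⟨ht, by simp [htc.1, htc.2]⟩, rfl⟩
              · simpa [List.length_append, Nat.add_sub_add_right] using hx
          · exact Or.inr ⟨st, List.mem_append.mpr (Or.inr hstm), hx⟩

-- ----- B-side recursion characterisation -----

theorem pvExtB_nodup (adj : PySem.Dict String (List String)) (start : String) :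
    ∀ (f : Nat) (path : List String) (fnd : PySem.Set (List String)),
    fnd.Nodup → (pvExtB adj start f path fnd).Nodup := by
  intro f
  induction f with
  | zero => intro path fnd h; exact h
  | succ f ih =>
    intro path fnd h
    simp only [pvExtB]
    generalize adj.getD (PySem.List.pyGetD path (-1) "") [] = ts
    induction ts generalizing fnd with
    | nil => exact h
    | cons t ts iht =>
      simp only [List.foldl_cons]
      apply iht
      split_ifs
      · exact PySem.Set.nodup_add _ _ h
      · exact h
      · exact ih _ _ h

theorem pvExtB_mem (adj : PySem.Dict String (List String)) (start : String) :
    ∀ (f : Nat) (path : List String) (fnd : PySem.Set (List String)) (x : List String),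
    x ∈ pvExtB adj start f path fnd ↔ x ∈ fnd ∨ x ∈ pvTreeB adj start f path := by
  intro f
  induction f with
  | zero => intro path fnd x; simp [pvExtB, pvTreeB]
  | succ f ih =>
    intro path fnd x
    simp only [pvExtB, pvTreeB]
    generalize adj.getD (PySem.List.pyGetD path (-1) "") [] = ts
    induction ts generalizing fnd with
    | nil => simp
    | cons t ts iht =>
      simp only [List.foldl_cons, List.flatMap_cons, List.mem_append]
      rw [iht]
      split_ifs with h1 h2
      · simp only [PySem.Set.mem_add, List.mem_singleton]
        tauto
      · simp only [List.not_mem_nil]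
        tauto
      · rw [ih]
        tauto

-- ----- outer folds -----

theorem pvOuterA_mem (edges : List (String × String))
    (adj : PySem.Dict String (List String))
    (Hadj : ∀ s, adj.getD s [] = (edges.filter (fun e => e.1 == s)).map (fun e => e.2)) :
    ∀ (nodes : List String) (acc : PySem.Set (List String)) (x : List String),
    x ∈ nodes.foldl (fun cyc start =>
        pvLoopA adj start ((edges.length + 2) ^ (edges.length + 1)) [(start, [start])] cyc)
      acc ↔
      x ∈ acc ∨ ∃ s ∈ nodes, x ∈ pvTree adj s (edges.length + 1) [s] := by
  have HK : ∀ s, (adj.getD s []).length ≤ edges.length := by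
    intro s'
    rw [Hadj]
    exact le_trans (le_of_eq (List.length_map _)) (List.length_filter_le _ _)
  have Hsub : ∀ (s s' t : String), t ∈ adj.getD s' [] → t ∈ s :: edges.map (fun e => e.2) := by
    intro s s' t ht
    rw [Hadj] at ht
    obtain ⟨e, he, rfl⟩ := List.mem_map.mp ht
    exact List.mem_cons_of_mem _ (List.mem_map.mpr ⟨e, (List.mem_filter.mp he).1, rfl⟩)
  intro nodes
  induction nodes with
  | nil => intro acc x; simp
  | cons s ns ih =>
    intro acc x
    simp only [List.foldl_cons]
    rw [ih]
    rw [pvLoopA_mem adj s (s :: edges.map (fun e => e.2)) edges.length (edges.length + 1)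
      HK (Hsub s) (by simp) ((edges.length + 2) ^ (edges.length + 1)) [(s, [s])] acc
      (by
        simp only [pvMeasA, List.map_cons, List.map_nil, List.sum_cons, List.sum_nil,
          List.length_cons, List.length_nil, Nat.add_zero]
        exact Nat.pow_le_pow_right (by omega) (by omega))
      (by intro st hst; rw [List.mem_singleton.mp hst]; exact ⟨by simp, by simp, by simp⟩)]
    simp only [List.mem_singleton]
    constructor
    · rintro ((hx | ⟨st, rfl, hx⟩) | ⟨q, hq, hx⟩)
      · exact Or.inl hx
      · exact Or.inr ⟨s, List.mem_cons_self, by simpa using hx⟩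
      · exact Or.inr ⟨q, List.mem_cons_of_mem _ hq, hx⟩
    · rintro (hx | ⟨q, hq, hx⟩)
      · exact Or.inl (Or.inl hx)
      · rcases List.mem_cons.mp hq with rfl | hq'
        · exact Or.inl (Or.inr ⟨(q, [q]), rfl, by simpa using hx⟩)
        · exact Or.inr ⟨q, hq', hx⟩

theorem pvOuterB_mem (edges : List (String × String))
    (adj : PySem.Dict String (List String)) :
    ∀ (nodes : List String) (acc : PySem.Set (List String)) (x : List String),
    x ∈ nodes.foldl (fun fnd start =>
        pvExtB adj start (edges.length + 1) [start] fnd) acc ↔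
      x ∈ acc ∨ ∃ s ∈ nodes, x ∈ pvTreeB adj s (edges.length + 1) [s] := by
  intro nodes
  induction nodes with
  | nil => intro acc x; simp
  | cons s ns ih =>
    intro acc x
    simp only [List.foldl_cons]
    rw [ih, pvExtB_mem]
    constructor
    · rintro ((hx | hx) | ⟨q, hq, hx⟩)
      · exact Or.inl hx
      · exact Or.inr ⟨s, List.mem_cons_self, hx⟩
      · exact Or.inr ⟨q, List.mem_cons_of_mem _ hq, hx⟩
    · rintro (hx | ⟨q, hq, hx⟩)
      · exact Or.inl (Or.inl hx)
      · rcases List.mem_cons.mp hq with rfl | hq'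
        · exact Or.inl (Or.inr hx)
        · exact Or.inr ⟨q, hq', hx⟩

theorem pvOuterA_nodup (edges : List (String × String))
    (adj : PySem.Dict String (List String)) :
    ∀ (nodes : List String) (acc : PySem.Set (List String)), acc.Nodup →
    (nodes.foldl (fun cyc start =>
        pvLoopA adj start ((edges.length + 2) ^ (edges.length + 1)) [(start, [start])] cyc)
      acc).Nodup := by
  intro nodes
  induction nodes with
  | nil => intro acc h; exact h
  | cons s ns ih =>
    intro acc h
    simp only [List.foldl_cons]
    exact ih _ (pvLoopA_nodup _ _ _ _ _ h)

theorem pvOuterB_nodup (edges : List (String × String))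
    (adj : PySem.Dict String (List String)) :
    ∀ (nodes : List String) (acc : PySem.Set (List String)), acc.Nodup →
    (nodes.foldl (fun fnd start =>
        pvExtB adj start (edges.length + 1) [start] fnd) acc).Nodup := by
  intro nodes
  induction nodes with
  | nil => intro acc h; exact h
  | cons s ns ih =>
    intro acc h
    simp only [List.foldl_cons]
    exact ih _ (pvExtB_nodup _ _ _ _ _ h)

theorem pvSorted_congr_inst (xs : List (List String)) :
    PySem.List.sorted xs (fun x => x) = @PySem.List.sorted (List String) (List String)
      inferInstance LinearOrder.toDecidableLT xs (fun x => x) false := by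
  congr 1

theorem pvSorted_eq (xs ys : List (List String)) (h : xs.Perm ys) :
    PySem.List.sorted xs (fun x => x) = PySem.List.sorted ys (fun x => x) := by
  rw [pvSorted_congr_inst xs, pvSorted_congr_inst ys]
  exact (PySem.List.sorted_id_eq_sorted_id_iff_perm xs ys).mpr h

theorem pvPorts_equal : ∀ (nodes : List String) (edges : List (String × String)),
    simple_cycles_py nodes edges = simple_cycles_py_alt nodes edges := by
  intro nodes edges
  simp only [simple_cycles_py, simple_cycles_py_alt]
  apply pvSorted_eq
  apply (List.perm_ext_iff_of_nodup
    (pvOuterA_nodup edges _ nodes _ List.nodup_nil)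
    (pvOuterB_nodup edges _ nodes _ List.nodup_nil)).mpr
  intro x
  rw [pvOuterA_mem edges _ (fun s => pvAdjA_getD nodes edges s) nodes _ x,
      pvOuterB_mem edges _ nodes _ x]
  have hcongr : ∀ (s : String) (f : Nat) (p : List String),
      pvTree (pvAdjA nodes edges) s f p = pvTree (pvAdjB edges) s f p := by
    intro s
    exact pvTree_congr _ _ s (fun s' => by rw [pvAdjA_getD, pvAdjB_getD])
  have hB : ∀ s : String, pvTreeB (pvAdjB edges) s (edges.length + 1) [s]
      = pvTree (pvAdjB edges) s (edges.length + 1) [s] := by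
    intro s
    exact pvTreeB_eq _ s _ [s] (by simp) (List.nodup_singleton s)
  simp only [hcongr, hB]

-- ===== VERDICT (by name: the statement is the Claim_ definition above) =====
theorem simple_cycles_py_spec : Claim_equal_simple_cycles_py := by
  intro nodes edges _
  unfold Spec_simple_cycles_py
  exact pvPorts_equal nodes edges
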